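-- pv_equiv track=rewrite | github.com/SpiritGreen/Python | Hexlet/Испытания/Инвертированный регистр.py | invert_case
-- ===== SOURCE A (Python) =====
-- def invert_case(text):
--   result = ''
--   for item in text:
--     if item.islower():
--       result += item.upper()
--     else:
--       result += item.lower()
--   return result
-- ===== SOURCE B (Python) =====
-- def invert_case(text):
--     table = {ord(c): (c.upper() if c.islower() else c.lower()) for c in set(text)}
--     return text.translate(table)
-- ===== Notes on version B (the rewrite author's own statement) =====
-- stated objective: faster
-- what changed: Replaces the char-by-char string-accumulating loop with building a per-codepoint translation table from the distinct characters and one bulk str.translate pass.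
import Mathlib
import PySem

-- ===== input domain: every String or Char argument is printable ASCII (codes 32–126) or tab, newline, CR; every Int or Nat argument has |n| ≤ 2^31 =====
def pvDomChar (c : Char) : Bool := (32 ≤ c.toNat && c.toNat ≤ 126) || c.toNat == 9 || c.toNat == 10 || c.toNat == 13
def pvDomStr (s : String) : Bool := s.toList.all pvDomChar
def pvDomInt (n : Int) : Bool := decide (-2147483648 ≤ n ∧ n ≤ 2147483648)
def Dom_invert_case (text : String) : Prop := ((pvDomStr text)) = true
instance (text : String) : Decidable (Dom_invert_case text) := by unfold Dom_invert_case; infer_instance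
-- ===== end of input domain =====

-- B builds a per-codepoint translation table from the distinct characters and applies it in one bulk pass (str.translate), instead of A's char-by-char string-accumulating loop; same return value.


-- ===== PORT A =====
-- result = ''; for item in text: result += item.upper() if item.islower() else item.lower()
def invert_case (text : String) : String :=
  String.mk (text.toList.foldl
    (fun result item =>
      result ++ (if PySem.Chars.islower item then PySem.Chars.upper [item] else PySem.Chars.lower [item]))
    [])

-- ===== PORT B =====
-- table = {ord(c): (c.upper() if c.islower() else c.lower()) for c in set(text)}; return text.translate(table)
-- (translate: each char is replaced by its table entry when present, kept otherwise)
def invert_case_alt (text : String) : String :=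
  let table : PySem.Dict Int (List Char) :=
    (PySem.Set.ofList text.toList).foldl
      (fun d c => d.insert ((c.toNat : Int))
        (if PySem.Chars.islower c then PySem.Chars.upper [c] else PySem.Chars.lower [c]))
      PySem.Dict.empty
  String.mk ((text.toList.map (fun c => (table.get? ((c.toNat : Int))).getD [c])).flatten)

-- ===== PRECONDITION & SPEC =====
def Spec_invert_case (text : String) (out : String) : Prop := out = invert_case_alt text
instance (text : String) (out : String) : Decidable (Spec_invert_case text out) := by unfold Spec_invert_case; infer_instance

-- ===== CLAIM (what is proved, stated in full; the proofs are below) =====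
def Claim_equal_invert_case : Prop := ∀ (text : String), Dom_invert_case text → Spec_invert_case text (invert_case text)

-- ===== LEMMAS AND PROOFS =====

-- the common per-character inversion
def pvInv (c : Char) : List Char :=
  if PySem.Chars.islower c then PySem.Chars.upper [c] else PySem.Chars.lower [c]

theorem pv_char_toNat_int_inj {a c : Char} (h : ((c.toNat : Int)) = ((a.toNat : Int))) : c = a := by
  have h2 : c.toNat = a.toNat := by exact_mod_cast h
  exact Char.ext (UInt32.toNat_inj.mp h2)

theorem pv_table_get (s : List Char) (d : PySem.Dict Int (List Char)) (c : Char)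
    (hc : c ∈ s ∨ d.get? ((c.toNat : Int)) = some (pvInv c)) :
    (s.foldl (fun d a => d.insert ((a.toNat : Int)) (pvInv a)) d).get? ((c.toNat : Int))
      = some (pvInv c) := by
  induction s generalizing d with
  | nil => simpa using hc.resolve_left (by simp)
  | cons a rest ih =>
    apply ih
    by_cases hca : c = a
    · subst hca
      by_cases hm : c ∈ rest
      · exact Or.inl hm
      · exact Or.inr (PySem.Dict.get?_insert_self _ _ _)
    · rcases hc with hmem | hget
      · rcases List.mem_cons.mp hmem with h | h
        · exact absurd h hca
        · exact Or.inl h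
      · refine Or.inr ?_
        rw [PySem.Dict.get?_insert_of_ne _ _ (fun h => hca (pv_char_toNat_int_inj h))]
        exact hget

theorem invert_case_spec : Claim_equal_invert_case := by
  intro text _
  show invert_case text = invert_case_alt text
  unfold invert_case invert_case_alt
  simp only [← pvInv.eq_def]
  congr 1
  rw [PySem.List.foldl_append_eq_flatMap pvInv, List.nil_append]
  have hmap : text.toList.map
      (fun c => ((((PySem.Set.ofList text.toList).foldl
        (fun d c => d.insert ((c.toNat : Int)) (pvInv c)) PySem.Dict.empty).get?
          ((c.toNat : Int))).getD [c]))
      = text.toList.map pvInv := by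
    apply List.map_congr_left
    intro c hc
    rw [pv_table_get _ _ _ (Or.inl ((PySem.Set.mem_ofList _ _).mpr hc))]
    rfl
  rw [hmap, List.flatMap_def]
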